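-- pv_equiv track=rewrite | github.com/camargodev/advent-of-code-2023 | day-14/src/part_2/rolling_stones.py | shift_to_east
-- ===== SOURCE A (Python) =====
-- CUBE_STONE = "#"
--
-- SPACE = "."
--
-- def shift_to_east(stones):
--     shifted_stones = []
--     for stone_line_idx in range(len(stones)):
--         shifted_parts = []
--         str_stone_line = "".join(stones[stone_line_idx])
--         for part in str_stone_line.split(CUBE_STONE):
--             grouped_stones = part.replace(SPACE, "")
--             empty_size = len(part) - len(grouped_stones)
--             shifted_parts.append((SPACE * empty_size) + grouped_stones)
--         str_shifted_line = CUBE_STONE.join(shifted_parts)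
--         shifted_line = [char for char in str_shifted_line]
--         shifted_stones.append(shifted_line)
--
--     return shifted_stones
-- ===== SOURCE B (Python) =====
-- def shift_to_east(stones):
--     result = []
--     for row in stones:
--         out = []      # everything from the first '#' of the remaining suffix onward
--         seg = []      # non-dot chars of the current (leftmost-unflushed) segment
--         dots = 0      # dot count of the current segment
--         for c in reversed([ch for s in row for ch in s]):
--             if c == '#':
--                 out = ['#'] + ['.'] * dots + seg + out
--                 seg = []
--                 dots = 0
--             elif c == '.':
--                 dots += 1
--             else:
--                 seg = [c] + seg
--         result.append(['.'] * dots + seg + out)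
--     return result
-- ===== Notes on version B (the rewrite author's own statement) =====
-- stated objective: alternative
-- what changed: A joins each row, splits it on '#', compacts each part with replace/len arithmetic and re-joins; B makes one right-to-left pass over the row's characters, carrying (flushed output, current segment's non-dot characters, current segment's dot count) and flushing at each '#', so no string splitting/joining happens.
import Mathlib
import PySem

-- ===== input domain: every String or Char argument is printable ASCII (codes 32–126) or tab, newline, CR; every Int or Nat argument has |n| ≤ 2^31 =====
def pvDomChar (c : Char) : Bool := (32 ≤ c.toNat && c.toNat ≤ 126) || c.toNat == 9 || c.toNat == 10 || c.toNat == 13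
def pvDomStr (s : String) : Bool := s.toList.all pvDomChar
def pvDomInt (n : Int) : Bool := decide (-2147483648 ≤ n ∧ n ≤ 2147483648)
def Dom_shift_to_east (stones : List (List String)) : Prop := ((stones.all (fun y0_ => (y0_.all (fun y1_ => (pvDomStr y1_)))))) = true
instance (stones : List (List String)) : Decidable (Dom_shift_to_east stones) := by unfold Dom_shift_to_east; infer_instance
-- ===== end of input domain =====

-- B replaces A's join/split('#')/replace('.')/join pipeline by one right-to-left pass per row
-- that keeps (flushed output, current segment's stones, current segment's dot count); objective: alternative.

-- ===== PORT A =====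
-- body of A's inner `for part in str_stone_line.split("#")` loop
def shiftPartA (part : List Char) : List Char :=
  let grouped := PySem.Chars.replace part ['.'] []
  let empty_size := part.length - grouped.length
  List.replicate empty_size '.' ++ grouped

-- body of A's outer loop for one line
def shiftLineA (line : List String) : List String :=
  let str_stone_line := PySem.Chars.join [] (line.map String.toList)
  let shifted_parts :=
    (PySem.Chars.splitOn str_stone_line ['#']).foldl
      (fun acc part => acc ++ [shiftPartA part]) []
  let str_shifted_line := PySem.Chars.join ['#'] shifted_parts
  str_shifted_line.map (fun c => String.ofList [c])

def shift_to_east (stones : List (List String)) : List (List String) :=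
  (PySem.List.pyRange 0 (stones.length : Int) 1).foldl
    (fun shifted_stones i =>
      shifted_stones ++ [shiftLineA (PySem.List.pyGetD stones i [])]) []

-- ===== PORT B =====
-- one step of B's `for c in reversed(...)` loop; state = (out, seg, dots)
def rollStep (st : List Char × List Char × Nat) (c : Char) : List Char × List Char × Nat :=
  if c = '#' then ('#' :: (List.replicate st.2.2 '.' ++ st.2.1 ++ st.1), [], 0)
  else if c = '.' then (st.1, st.2.1, st.2.2 + 1)
  else (st.1, c :: st.2.1, st.2.2)

def rollRow (row : List String) : List Char :=
  let flat := (row.map String.toList).flatten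
  let st := flat.reverse.foldl rollStep ([], [], 0)
  List.replicate st.2.2 '.' ++ st.2.1 ++ st.1

def shift_to_east_alt (stones : List (List String)) : List (List String) :=
  stones.foldl
    (fun result row => result ++ [(rollRow row).map (fun c => String.ofList [c])]) []

-- ===== PRECONDITION & SPEC =====
def Spec_shift_to_east (stones : List (List String)) (out : List (List String)) : Prop := out = shift_to_east_alt stones
instance (stones : List (List String)) (out : List (List String)) : Decidable (Spec_shift_to_east stones out) := by unfold Spec_shift_to_east; infer_instance

-- ===== CLAIM (what is proved, stated in full; the proofs are below) =====
def Claim_equal_shift_to_east : Prop := ∀ (stones : List (List String)), Dom_shift_to_east stones → Spec_shift_to_east stones (shift_to_east stones)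

-- ===== LEMMAS AND PROOFS =====

-- reference form of Python's str.split("#") (single-character separator)
def split1 : List Char → List (List Char)
  | [] => [[]]
  | c :: t => if c = '#' then [] :: split1 t else (split1 t).modifyHead (c :: ·)

-- reference form of A's per-part shift
def render (p : List Char) : List Char :=
  List.replicate (p.count '.') '.' ++ p.filter (· != '.')

def split1Tail (cs : List Char) : List (List Char) :=
  match cs.dropWhile (· != '#') with
  | [] => []
  | _ :: t => split1 t

-- what B's `out` component holds: everything from the first '#' on, already shifted
def tailOut (cs : List Char) : List Char :=
  match cs.dropWhile (· != '#') with
  | [] => []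
  | _ :: t => '#' :: List.intercalate ['#'] ((split1 t).map render)

lemma split1_eq (cs : List Char) :
    split1 cs = cs.takeWhile (· != '#') :: split1Tail cs := by
  induction cs with
  | nil => simp [split1, split1Tail]
  | cons c t ih =>
    by_cases h : c = '#'
    · subst h; simp [split1, split1Tail]
    · simp [split1, split1Tail, h, ih]

lemma intercalate_nil_eq_flatten (parts : List (List Char)) :
    List.intercalate [] parts = parts.flatten := by
  induction parts with
  | nil => simp [List.intercalate]
  | cons x xs ih =>
    cases xs with
    | nil => simp [List.intercalate]
    | cons y ys => simp_all [List.intercalate, List.intersperse]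

lemma intercalate_cons_cons (x y : List Char) (ys : List (List Char)) :
    List.intercalate ['#'] (x :: y :: ys) = x ++ '#' :: List.intercalate ['#'] (y :: ys) := by
  simp [List.intercalate, List.intersperse]

-- the shifted row decomposes as its first segment plus everything from the first '#'
lemma intercalate_split1 (cs : List Char) :
    List.intercalate ['#'] ((split1 cs).map render) =
      render (cs.takeWhile (· != '#')) ++ tailOut cs := by
  rw [split1_eq]
  cases h : cs.dropWhile (· != '#') with
  | nil =>
    have h1 : split1Tail cs = [] := by simp [split1Tail, h]
    simp [h1, tailOut, h, List.intercalate]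
  | cons x t =>
    have h1 : split1Tail cs = split1 t := by simp [split1Tail, h]
    rw [h1, split1_eq t, List.map_cons, List.map_cons, intercalate_cons_cons]
    rw [← List.map_cons (f := render), ← split1_eq t]
    simp [tailOut, h]

-- Python's part.replace(".", "") is a filter
lemma replace_go_filter (l : List Char) :
    ∀ (fuel : Nat) (acc : List Char), l.length ≤ fuel →
      PySem.Chars.replace.go ['.'] [] fuel l acc = acc.reverse ++ l.filter (· != '.') := by
  induction l with
  | nil =>
    intro fuel acc _
    cases fuel <;> simp [PySem.Chars.replace.go]
  | cons c t ih =>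
    intro fuel acc hf
    cases fuel with
    | zero => simp at hf
    | succ f =>
      by_cases h : c = '.'
      · subst h
        rw [PySem.Chars.replace.go]
        rw [if_pos (by simp [List.isPrefixOf])]
        simp only [List.length_singleton, List.drop_succ_cons, List.drop_zero,
          List.reverse_nil, List.nil_append]
        rw [ih f acc (by simpa using hf)]
        simp
      · rw [PySem.Chars.replace.go]
        rw [if_neg (by simp [List.isPrefixOf]; exact fun hh => absurd hh.symm h)]
        rw [ih f (c :: acc) (by simpa using hf)]
        simp [h]

lemma replace_dot (p : List Char) :
    PySem.Chars.replace p ['.'] [] = p.filter (· != '.') := by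
  rw [PySem.Chars.replace]
  rw [if_neg (by simp)]
  exact replace_go_filter p p.length [] le_rfl

lemma splitOn_go_succ_cons (f : Nat) (c : Char) (rest cur : List Char) (acc : List (List Char)) :
    PySem.Chars.splitOn.go ['#'] (f+1) (c::rest) cur acc =
      if ['#'].isPrefixOf (c::rest) then
        PySem.Chars.splitOn.go ['#'] f (List.drop 1 (c::rest)) [] (cur.reverse :: acc)
      else PySem.Chars.splitOn.go ['#'] f rest (c :: cur) acc := rfl

-- Python's str.split("#") computes split1
lemma splitOn_go_split1 (l : List Char) :
    ∀ (fuel : Nat) (cur : List Char) (acc : List (List Char)), l.length ≤ fuel →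
      PySem.Chars.splitOn.go ['#'] fuel l cur acc =
        acc.reverse ++ (split1 l).modifyHead (cur.reverse ++ ·) := by
  induction l with
  | nil =>
    intro fuel cur acc _
    cases fuel <;> simp [PySem.Chars.splitOn.go, split1]
  | cons c t ih =>
    intro fuel cur acc hf
    cases fuel with
    | zero => simp at hf
    | succ f =>
      rw [splitOn_go_succ_cons]
      by_cases h : c = '#'
      · subst h
        rw [if_pos (by simp [List.isPrefixOf])]
        simp only [List.drop_succ_cons, List.drop_zero]
        rw [ih f [] (cur.reverse :: acc) (by simpa using hf)]
        simp [split1]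
        rw [split1_eq t]
        simp
      · rw [if_neg (by simp [List.isPrefixOf]; exact fun hh => absurd hh.symm h)]
        rw [ih f (c :: cur) acc (by simpa using hf)]
        rw [split1_eq t]
        simp [split1, h, split1_eq t]

lemma splitOn_eq_split1 (cs : List Char) :
    PySem.Chars.splitOn cs ['#'] = split1 cs := by
  rw [PySem.Chars.splitOn, splitOn_go_split1 cs (cs.length + 1) [] [] (by omega)]
  rw [split1_eq cs]
  simp

-- A's per-part computation is `render`
lemma shiftPartA_eq_render (p : List Char) : shiftPartA p = render p := by
  have h1 : (p.filter (· != '.')).length + p.count '.' = p.length := by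
    induction p with
    | nil => simp
    | cons c t ih =>
      by_cases h : c = '.' <;> simp [h] <;> omega
  simp only [shiftPartA, render, replace_dot]
  congr 2
  omega

-- B's loop invariant: out = tailOut, seg = stones of the first segment, dots = its dot count
lemma foldl_rollStep_inv (cs : List Char) :
    cs.reverse.foldl rollStep ([], [], 0) =
      (tailOut cs, (cs.takeWhile (· != '#')).filter (· != '.'),
        (cs.takeWhile (· != '#')).count '.') := by
  rw [List.foldl_reverse]
  induction cs with
  | nil => simp [tailOut]
  | cons c t ih =>
    rw [List.foldr_cons, ih]
    by_cases h1 : c = '#'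
    · subst h1
      have : tailOut ('#' :: t) = '#' :: List.intercalate ['#'] ((split1 t).map render) := by
        simp [tailOut]
      rw [this, intercalate_split1]
      simp [rollStep, render]
    · by_cases h2 : c = '.'
      · subst h2
        have : tailOut ('.' :: t) = tailOut t := by
          simp [tailOut]
        simp [rollStep, this, h1]
      · have : tailOut (c :: t) = tailOut t := by
          simp [tailOut, h1]
        simp [rollStep, this, h1, h2]

-- per-row equality of the two ports
lemma row_eq (line : List String) : shiftLineA line = (rollRow line).map (fun c => String.ofList [c]) := by
  rw [shiftLineA, rollRow]
  have hflat : PySem.Chars.join [] (line.map String.toList) = (line.map String.toList).flatten := by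
    rw [PySem.Chars.join, intercalate_nil_eq_flatten]
  rw [hflat]
  congr 1
  rw [PySem.List.foldl_append_singleton_eq_map, splitOn_eq_split1, PySem.Chars.join]
  rw [foldl_rollStep_inv]
  simp only [List.nil_append]
  rw [List.map_congr_left (fun p _ => shiftPartA_eq_render p)]
  rw [intercalate_split1]
  simp [render]

-- ===== VERDICT (by name: the statement is the Claim_ definition above) =====
theorem shift_to_east_spec : Claim_equal_shift_to_east := by
  intro stones _
  unfold Spec_shift_to_east shift_to_east shift_to_east_alt
  rw [PySem.List.foldl_pyRange_zero_pyGetD' stones []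
    (fun acc line => acc ++ [shiftLineA line]) []]
  rw [PySem.List.foldl_append_singleton_eq_map, PySem.List.foldl_append_singleton_eq_map]
  exact List.map_congr_left (fun line _ => row_eq line)
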